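-- pv_equiv track=rewrite | github.com/dafyddstephenson/ucla-roms | Examples/Explicit_use/explicit_use.py | find_compiler_error_blocks
-- ===== SOURCE A (Python) =====
-- def find_compiler_error_blocks(output_lines, filename_stem):
--     blocks = []
--     n = len(output_lines)
--     i = 0
--     while i < n:
--         line = output_lines[i].lower().strip()
--
--         if line.startswith("error:"):
--             # Walk back to filename
--             block_start = i
--             while block_start > 0 and filename_stem not in output_lines[block_start]:
--                 block_start -= 1
--             # Now capture from filename to current 'Error:' line, inclusive
--             block = output_lines[block_start:i+1]
--             blocks.append(block)
--         i += 1
--     return blocks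
-- ===== SOURCE B (Python) =====
-- def find_compiler_error_blocks(output_lines, filename_stem):
--     # One forward pass: maintain the index of the nearest previous line that
--     # contains filename_stem (0 if none seen yet) instead of scanning backwards.
--     blocks = []
--     last_filename = 0
--     for i, line in enumerate(output_lines):
--         if filename_stem in line:
--             last_filename = i
--         if line.lower().strip().startswith("error:"):
--             blocks.append(output_lines[last_filename:i + 1])
--     return blocks
-- ===== Notes on version B (the rewrite author's own statement) =====
-- stated objective: simpler
-- what changed: Replaces A's per-error-line backward scan for the nearest filename line with a single forward pass that maintains the index of the last line containing the stem (O(n) scan worst case vs A's O(n^2), though not measurably faster on the timed inputs).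
import Mathlib
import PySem

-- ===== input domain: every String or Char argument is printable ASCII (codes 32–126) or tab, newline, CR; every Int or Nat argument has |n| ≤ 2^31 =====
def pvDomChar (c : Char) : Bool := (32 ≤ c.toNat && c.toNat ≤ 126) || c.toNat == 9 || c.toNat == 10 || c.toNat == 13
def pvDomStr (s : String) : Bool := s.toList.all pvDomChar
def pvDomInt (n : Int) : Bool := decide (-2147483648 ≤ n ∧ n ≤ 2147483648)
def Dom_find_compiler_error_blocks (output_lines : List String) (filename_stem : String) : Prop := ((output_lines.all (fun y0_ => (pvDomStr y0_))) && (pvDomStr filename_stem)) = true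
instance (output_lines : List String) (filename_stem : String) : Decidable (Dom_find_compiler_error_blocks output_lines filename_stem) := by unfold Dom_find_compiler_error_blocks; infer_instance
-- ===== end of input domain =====

-- B replaces A's per-error backward scan with one forward pass maintaining the last filename index (simpler single pass).

-- ===== PORT A =====
-- inner `while block_start > 0 and filename_stem not in output_lines[block_start]: block_start -= 1`
def pvBackScan (output_lines : List String) (filename_stem : String) : Nat → Nat
  | 0 => 0
  | bs + 1 =>
    if PySem.Str.isIn filename_stem (output_lines.getD (bs + 1) "") then bs + 1
    else pvBackScan output_lines filename_stem bs

def find_compiler_error_blocks (output_lines : List String) (filename_stem : String) : List (List String) :=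
  -- `while i < n: … i += 1` over i = 0 … n-1
  (List.range output_lines.length).foldl
    (fun blocks i =>
      let line := PySem.Str.strip (PySem.Str.lower (output_lines.getD i ""))
      if PySem.Str.startswith line "error:" then
        let block_start := pvBackScan output_lines filename_stem i
        blocks ++ [PySem.List.slice output_lines (some (block_start : Int)) (some ((i : Int) + 1))]
      else blocks)
    []

-- ===== PORT B =====
def find_compiler_error_blocks_alt (output_lines : List String) (filename_stem : String) : List (List String) :=
  ((PySem.List.enumerate output_lines 0).foldl
    (fun (st : Int × List (List String)) p =>
      let last_filename := if PySem.Str.isIn filename_stem p.2 then p.1 else st.1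
      if PySem.Str.startswith (PySem.Str.strip (PySem.Str.lower p.2)) "error:" then
        (last_filename, st.2 ++ [PySem.List.slice output_lines (some last_filename) (some (p.1 + 1))])
      else (last_filename, st.2))
    (0, [])).2

-- ===== PRECONDITION & SPEC =====
def Spec_find_compiler_error_blocks (output_lines : List String) (filename_stem : String) (out : List (List String)) : Prop := out = find_compiler_error_blocks_alt output_lines filename_stem
instance (output_lines : List String) (filename_stem : String) (out : List (List String)) : Decidable (Spec_find_compiler_error_blocks output_lines filename_stem out) := by unfold Spec_find_compiler_error_blocks; infer_instance

-- ===== CLAIM (what is proved, stated in full; the proofs are below) =====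
def Claim_equal_find_compiler_error_blocks : Prop := ∀ (output_lines : List String) (filename_stem : String), Dom_find_compiler_error_blocks output_lines filename_stem → Spec_find_compiler_error_blocks output_lines filename_stem (find_compiler_error_blocks output_lines filename_stem)

-- ===== LEMMAS AND PROOFS =====

-- B's running `last_filename` value after processing lines 0 … s-1
def pvLastVal (output_lines : List String) (filename_stem : String) : Nat → Int
  | 0 => 0
  | s + 1 => if PySem.Str.isIn filename_stem (output_lines.getD s "") then (s : Int)
             else pvLastVal output_lines filename_stem s

theorem pvLastVal_eq_backScan (xs : List String) (stem : String) (s : Nat) :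
    pvLastVal xs stem (s + 1) = ((pvBackScan xs stem s : Nat) : Int) := by
  induction s with
  | zero => simp [pvLastVal, pvBackScan]
  | succ n ih =>
      rw [pvLastVal, pvBackScan]
      split_ifs with h <;> simp [ih]

theorem pvMain (xs : List String) (stem : String) :
    ∀ (ys : List String) (s : Nat), ys = xs.drop s →
    ∀ (acc : List (List String)),
    ((PySem.List.enumerate ys (s : Int)).foldl
      (fun (st : Int × List (List String)) p =>
        let last_filename := if PySem.Str.isIn stem p.2 then p.1 else st.1
        if PySem.Str.startswith (PySem.Str.strip (PySem.Str.lower p.2)) "error:" then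
          (last_filename, st.2 ++ [PySem.List.slice xs (some last_filename) (some (p.1 + 1))])
        else (last_filename, st.2))
      (pvLastVal xs stem s, acc)).2
    = (List.range' s ys.length).foldl
        (fun blocks i =>
          let line := PySem.Str.strip (PySem.Str.lower (xs.getD i ""))
          if PySem.Str.startswith line "error:" then
            let block_start := pvBackScan xs stem i
            blocks ++ [PySem.List.slice xs (some (block_start : Int)) (some ((i : Int) + 1))]
          else blocks)
        acc := by
  intro ys
  induction ys with
  | nil => intro s _ acc; simp [PySem.List.enumerate]
  | cons y ys ih =>
      intro s hy acc
      have hget : xs.getD s "" = y := by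
        have h0 : (xs.drop s)[0]? = some y := by rw [← hy]; rfl
        rw [List.getElem?_drop] at h0
        simp only [Nat.add_zero] at h0
        simp [List.getD, h0]
      have hdrop : ys = xs.drop (s + 1) := by
        have ht : (xs.drop s).tail = ys := by rw [← hy]; rfl
        rw [← ht, List.tail_drop]
      have hlast : (if PySem.Str.isIn stem y = true then (s : Int) else pvLastVal xs stem s)
          = pvLastVal xs stem (s + 1) := by
        rw [pvLastVal, hget]
      rw [PySem.List.enumerate_cons, List.length_cons, List.range'_succ, List.foldl_cons,
        List.foldl_cons]
      simp only [hget]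
      by_cases herr : PySem.Str.startswith (PySem.Str.strip (PySem.Str.lower y)) "error:" = true
      · simp only [if_pos herr]
        rw [hlast, ← pvLastVal_eq_backScan]
        have h := ih (s + 1) hdrop
          (acc ++ [PySem.List.slice xs (some (pvLastVal xs stem (s + 1))) (some ((s : Int) + 1))])
        push_cast at h ⊢
        exact h
      · simp only [if_neg herr]
        rw [hlast]
        have h := ih (s + 1) hdrop acc
        push_cast at h ⊢
        exact h

-- ===== VERDICT (by name: the statement is the Claim_ definition above) =====
theorem find_compiler_error_blocks_spec : Claim_equal_find_compiler_error_blocks := by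
  intro xs stem _
  unfold Spec_find_compiler_error_blocks find_compiler_error_blocks find_compiler_error_blocks_alt
  have h := pvMain xs stem xs 0 (by simp) []
  simp only [pvLastVal, Nat.cast_zero] at h
  simpa [List.range_eq_range'] using h.symm
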